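-- pv_equiv track=rewrite | github.com/WandersonGomes/URIJudge | problem_2790.py | quantidadeMinimaMovimentos
-- ===== SOURCE A (Python) =====
-- MAX = 100001
--
-- def quantidadeMinimaMovimentos(dados):
--     valores_iniciais_faces = set(dados)
--
--     resultado = MAX
--
--     for valor in valores_iniciais_faces:
--         tmp = 0
--         for face in dados:
--             if (valor+face) == 7:
--                 tmp += 2
--             elif (valor != face):
--                 tmp += 1
--
--         if tmp < resultado:
--             resultado = tmp
--
--     return resultado
-- ===== SOURCE B (Python) =====
-- from collections import Counter
--
-- MAX = 100001
--
-- def quantidadeMinimaMovimentos(dados):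
--     c = Counter(dados)
--     n = len(dados)
--     return min([MAX] + [n - c[v] + c[7 - v] for v in c])
-- ===== Notes on version B (the rewrite author's own statement) =====
-- stated objective: faster
-- what changed: Replaces the nested scan (for each distinct value, rescan the whole list) by a single Counter pass and the closed-form cost n - count[v] + count[7-v] per distinct value.
import Mathlib
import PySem

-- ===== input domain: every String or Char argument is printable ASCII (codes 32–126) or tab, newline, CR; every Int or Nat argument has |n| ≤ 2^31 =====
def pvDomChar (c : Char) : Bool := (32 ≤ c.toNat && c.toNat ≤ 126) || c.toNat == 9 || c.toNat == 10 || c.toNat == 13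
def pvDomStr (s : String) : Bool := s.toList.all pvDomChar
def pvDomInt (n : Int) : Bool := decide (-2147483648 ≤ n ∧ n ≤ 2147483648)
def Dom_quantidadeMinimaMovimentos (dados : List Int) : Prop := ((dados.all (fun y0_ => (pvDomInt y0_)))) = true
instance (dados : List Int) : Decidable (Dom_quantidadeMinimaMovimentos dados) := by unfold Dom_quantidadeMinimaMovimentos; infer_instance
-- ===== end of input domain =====

-- B replaces A's nested scan by one Counter pass with closed-form cost n - count[v] + count[7-v] (asymptotically faster).


-- ===== PORT A =====
-- A iterates over a Python set; the result is a min of Ints, so it is independent of iteration order.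
def quantidadeMinimaMovimentos (dados : List Int) : Int :=
  let valores_iniciais_faces := PySem.Set.ofList dados
  valores_iniciais_faces.foldl (fun resultado valor =>
    let tmp := dados.foldl (fun tmp face =>
      if valor + face = 7 then tmp + 2
      else if valor ≠ face then tmp + 1
      else tmp) 0
    if tmp < resultado then tmp else resultado) 100001

-- ===== PORT B =====
def quantidadeMinimaMovimentos_alt (dados : List Int) : Int :=
  let c := PySem.Dict.counter dados
  let n : Int := dados.length
  (PySem.List.min? ((100001 : Int) ::
      c.keys.map (fun v => n - c.getD v 0 + c.getD (7 - v) 0)) (fun x => x)).getD 0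

-- ===== PRECONDITION & SPEC =====
def Spec_quantidadeMinimaMovimentos (dados : List Int) (out : Int) : Prop := out = quantidadeMinimaMovimentos_alt dados
instance (dados : List Int) (out : Int) : Decidable (Spec_quantidadeMinimaMovimentos dados out) := by unfold Spec_quantidadeMinimaMovimentos; infer_instance

-- ===== CLAIM (what is proved, stated in full; the proofs are below) =====
def Claim_equal_quantidadeMinimaMovimentos : Prop := ∀ (dados : List Int), Dom_quantidadeMinimaMovimentos dados → Spec_quantidadeMinimaMovimentos dados (quantidadeMinimaMovimentos dados)

-- ===== LEMMAS AND PROOFS =====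

-- A's inner loop computes len - count v + count (7-v), as an accumulator offset.
lemma pv_inner (v : Int) (l : List Int) (t : Int) :
    l.foldl (fun tmp face =>
      if v + face = 7 then tmp + 2
      else if v ≠ face then tmp + 1
      else tmp) t
    = t + ((l.length : Int) - l.count v + l.count (7 - v)) := by
  induction l generalizing t with
  | nil => simp
  | cons a l ih =>
    simp only [List.foldl_cons, List.count_cons, List.length_cons, beq_iff_eq, ih]
    split_ifs <;> push_cast <;> omega

-- the running "keep the smaller" loop is a fold of min over the mapped list
lemma pv_fold_min (f : Int → Int) (l : List Int) (init : Int) :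
    l.foldl (fun resultado valor =>
      let tmp := f valor
      if tmp < resultado then tmp else resultado) init
    = (l.map f).foldl min init := by
  induction l generalizing init with
  | nil => rfl
  | cons a l ih =>
    simp only [List.foldl_cons, List.map_cons, ih]
    congr 1
    simp only [min_def]
    split_ifs <;> omega

-- ===== VERDICT (by name: the statement is the Claim_ definition above) =====
theorem quantidadeMinimaMovimentos_spec : Claim_equal_quantidadeMinimaMovimentos := by
  intro dados _
  unfold Spec_quantidadeMinimaMovimentos quantidadeMinimaMovimentos quantidadeMinimaMovimentos_alt
  simp only [PySem.Dict.keys_counter, PySem.Dict.getD_counter, PySem.List.min?_id_cons,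
    Option.getD_some, pv_fold_min]
  congr 1
  apply List.map_congr_left
  intro v _
  simpa using pv_inner v dados 0
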